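-- pv_equiv track=rewrite | github.com/selfreferencing/erdos-86-lean | verify_prompt0_flaw.py | check_coverage
-- ===== SOURCE A (Python) =====
-- def divisors_of_square(n):
--     """Return all divisors of n²."""
--     def factor(n):
--         factors = []
--         d = 2
--         temp = n
--         while d * d <= temp:
--             if temp % d == 0:
--                 e = 0
--                 while temp % d == 0:
--                     e += 1
--                     temp //= d
--                 factors.append((d, e))
--             d += 1
--         if temp > 1:
--             factors.append((temp, 1))
--         return factors
--
--     facts = factor(n)
--     divs = [1]
--     for p, e in facts:
--         new_divs = []
--         for d in divs:
--             power = 1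
--             for i in range(2*e + 1):
--                 new_divs.append(d * power)
--                 power *= p
--         divs = new_divs
--     return sorted(divs)
--
-- def check_coverage(p, k):
--     """
--     Check if prime p is covered by k.
--     Returns (covered, witness_d, x_k, divisor_residues)
--     """
--     m_k = 4 * k + 3
--     x_k = (p + m_k) // 4
--     target = (-x_k) % m_k
--
--     divs = divisors_of_square(x_k)
--     div_residues = [(d, d % m_k) for d in divs]
--
--     witness = None
--     for d in divs:
--         if d % m_k == target:
--             witness = d
--             break
--
--     return (witness is not None, witness, x_k, div_residues, target)
-- ===== SOURCE B (Python) =====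
-- import math
--
-- def _divisors_of_square(n):
--     """All divisors of n**2, computed from the divisors of n.
--
--     Every divisor of n**2 is a product of two divisors of n (and conversely),
--     so we collect the divisors of n by scanning up to isqrt(n) and take all
--     pairwise products.  Nonpositive n is degenerate (n has no positive
--     factorization); return [1] as the reference implementation does.
--     """
--     if n <= 0:
--         return [1]
--     divs_n = set()
--     for j in range(1, math.isqrt(n) + 1):
--         if n % j == 0:
--             divs_n.add(j)
--             divs_n.add(n // j)
--     return sorted({a * b for a in divs_n for b in divs_n})
--
-- def check_coverage(p, k):
--     m_k = 4 * k + 3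
--     x_k = (p + m_k) // 4
--     target = (-x_k) % m_k
--     div_residues = [(d, d % m_k) for d in _divisors_of_square(x_k)]
--     witness = next((d for d, r in div_residues if r == target), None)
--     return (witness is not None, witness, x_k, div_residues, target)
-- ===== Notes on version B (the rewrite author's own statement) =====
-- stated objective: alternative
-- what changed: divisors_of_square no longer builds a prime factorization by trial division and multiplies out prime-power combinations; B collects the divisors of n by a single isqrt-bounded divisor-pair scan and returns the sorted set of all pairwise products (every divisor of n^2 is a product of two divisors of n), and the witness scan reuses the residue list.
import Mathlib
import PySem

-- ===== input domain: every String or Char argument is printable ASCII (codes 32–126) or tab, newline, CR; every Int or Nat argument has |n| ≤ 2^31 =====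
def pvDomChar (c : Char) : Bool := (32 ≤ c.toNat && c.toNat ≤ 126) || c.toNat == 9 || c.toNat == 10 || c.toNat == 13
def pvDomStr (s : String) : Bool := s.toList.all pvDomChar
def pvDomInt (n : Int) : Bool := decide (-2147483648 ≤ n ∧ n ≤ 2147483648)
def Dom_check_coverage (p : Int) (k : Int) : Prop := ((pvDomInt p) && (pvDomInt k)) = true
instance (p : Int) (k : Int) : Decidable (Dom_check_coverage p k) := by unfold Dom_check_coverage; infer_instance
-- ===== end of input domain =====

-- B replaces A's trial-division factorization + multiplicative divisor expansion by a
-- divisor-pair scan of n up to isqrt(n) followed by all pairwise products (alternative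
-- algorithm, similar cost); return values are proved identical on the whole domain.

-- ===== PORT A =====

-- inner while loop of factor(): divide d out of temp, counting e.
-- (fuel only makes the recursion structural; the callers pass enough fuel for every
--  state the program reaches, so the computation is the same)
def pvDivOut (fuel : Nat) (d temp e : Int) : Int × Int :=
  match fuel with
  | 0 => (e, temp)
  | f + 1 =>
    if PySem.Int.mod temp d = 0 then pvDivOut f d (PySem.Int.floordiv temp d) (e + 1)
    else (e, temp)

-- outer while loop of factor(): state (d, temp, factors)
def pvFactorLoop (fuel : Nat) (d temp : Int) (facc : List (Int × Int)) : List (Int × Int) × Int :=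
  match fuel with
  | 0 => (facc, temp)
  | f + 1 =>
    if d * d ≤ temp then
      if PySem.Int.mod temp d = 0 then
        let r := pvDivOut (temp.toNat + 1) d temp 0
        pvFactorLoop f (d + 1) r.2 (facc ++ [(d, r.1)])
      else pvFactorLoop f (d + 1) temp facc
    else (facc, temp)

def pvFactor (n : Int) : List (Int × Int) :=
  let r := pvFactorLoop (n.toNat + 2) 2 n []
  if 1 < r.2 then r.1 ++ [(r.2, 1)] else r.1

-- the nested divisor-building loops of divisors_of_square
def pvExpand (facts : List (Int × Int)) : List Int :=
  facts.foldl (fun divs pe =>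
    divs.foldl (fun new_divs d =>
      ((PySem.List.pyRange 0 (2 * pe.2 + 1) 1).foldl
        (fun (st : List Int × Int) _ => (st.1 ++ [d * st.2], st.2 * pe.1))
        (new_divs, 1)).1)
      [])
    [1]

def pvDivisorsOfSquare (n : Int) : List Int :=
  PySem.List.sorted (pvExpand (pvFactor n)) (fun x => x) false

def check_coverage (p : Int) (k : Int) : Bool × Option Int × Int × (List (Int × Int)) × Int :=
  let m_k := 4 * k + 3
  let x_k := PySem.Int.floordiv (p + m_k) 4
  let target := PySem.Int.mod (-x_k) m_k
  let divs := pvDivisorsOfSquare x_k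
  let div_residues := divs.map (fun d => (d, PySem.Int.mod d m_k))
  let witness := divs.find? (fun d => PySem.Int.mod d m_k == target)
  (witness.isSome, witness, x_k, div_residues, target)

-- ===== PORT B =====

-- math.isqrt(n) is ported as Nat.sqrt n.toNat — exact for the n > 0 reached here.
def pvDivisorsOfSquareAlt (n : Int) : List Int :=
  if n ≤ 0 then [1]
  else
    let divsN : PySem.Set Int :=
      (PySem.List.pyRange 1 (((Nat.sqrt n.toNat : Nat) : Int) + 1) 1).foldl
        (fun s j =>
          if PySem.Int.mod n j = 0 then
            PySem.Set.add (PySem.Set.add s j) (PySem.Int.floordiv n j)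
          else s)
        PySem.Set.empty
    PySem.List.sorted
      (PySem.Set.ofList (divsN.flatMap (fun a => divsN.map (fun b => a * b))))
      (fun x => x) false

def check_coverage_alt (p : Int) (k : Int) : Bool × Option Int × Int × (List (Int × Int)) × Int :=
  let m_k := 4 * k + 3
  let x_k := PySem.Int.floordiv (p + m_k) 4
  let target := PySem.Int.mod (-x_k) m_k
  let div_residues := (pvDivisorsOfSquareAlt x_k).map (fun d => (d, PySem.Int.mod d m_k))
  let witness := (div_residues.find? (fun dr => dr.2 == target)).map (fun dr => dr.1)
  (witness.isSome, witness, x_k, div_residues, target)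

-- ===== PRECONDITION & SPEC =====
def Spec_check_coverage (p : Int) (k : Int) (out : Bool × Option Int × Int × (List (Int × Int)) × Int) : Prop := out = check_coverage_alt p k
instance (p : Int) (k : Int) (out : Bool × Option Int × Int × (List (Int × Int)) × Int) : Decidable (Spec_check_coverage p k out) := by unfold Spec_check_coverage; infer_instance

-- ===== CLAIM (what is proved, stated in full; the proofs are below) =====
def Claim_equal_check_coverage : Prop := ∀ (p : Int) (k : Int), Dom_check_coverage p k → Spec_check_coverage p k (check_coverage p k)

-- ===== LEMMAS AND PROOFS =====

-- ---- generic arithmetic helpers ----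

theorem pvDvdPrimePow (p x : Int) (hp : Prime p) (hp1 : 1 < p) (hx : 0 < x) {m : Nat}
    (h : x ∣ p ^ m) : ∃ i ≤ m, x = p ^ i := by
  have hN : x.natAbs ∣ p.natAbs ^ m := by
    have h2 := Int.natAbs_dvd_natAbs.mpr h
    rwa [Int.natAbs_pow] at h2
  obtain ⟨i, him, hxi⟩ := (Nat.dvd_prime_pow (Int.prime_iff_natAbs_prime.mp hp)).mp hN
  refine ⟨i, him, ?_⟩
  have h1 : (x.natAbs : Int) = x := Int.natAbs_of_nonneg (le_of_lt hx)
  have h2 : (p.natAbs : Int) = p := Int.natAbs_of_nonneg (by omega)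
  rw [← h1, hxi]
  push_cast
  rw [abs_of_pos (show (0:Int) < p by omega)]

theorem pvPrimeEq (p q : Int) (hp : Prime p) (hq : Prime q) (hp1 : 1 < p) (hq1 : 1 < q)
    (h : q ∣ p) : q = p := by
  have h1 : q.natAbs ∣ p.natAbs := Int.natAbs_dvd_natAbs.mpr h
  have h2 : q.natAbs = p.natAbs :=
    (Nat.prime_dvd_prime_iff_eq (Int.prime_iff_natAbs_prime.mp hq)
      (Int.prime_iff_natAbs_prime.mp hp)).mp h1
  omega

theorem pvUniqueAux (p M d₁ d₂ : Int) (i j : Nat) (hp1 : 1 < p) (hpM : ¬ p ∣ M)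
    (h1 : d₁ ∣ M) (hij : i ≤ j) (heq : d₁ * p ^ i = d₂ * p ^ j) : d₁ = d₂ ∧ i = j := by
  have hpow : (p : Int) ^ i ≠ 0 := pow_ne_zero _ (by omega)
  have hd : d₁ = d₂ * p ^ (j - i) := by
    have : d₁ * p ^ i = d₂ * p ^ (j - i) * p ^ i := by
      rw [mul_assoc, ← pow_add]
      have : j - i + i = j := by omega
      rw [this]; exact heq
    exact mul_right_cancel₀ hpow this
  rcases Nat.eq_or_lt_of_le hij with h | h
  · subst h
    simp at hd
    exact ⟨by simpa using hd, rfl⟩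
  · exfalso
    apply hpM
    have hpd : p ∣ d₁ := by
      rw [hd]
      exact Dvd.dvd.mul_left (dvd_pow_self p (by omega)) d₂
    exact hpd.trans h1

theorem pvUnique (p M d₁ d₂ : Int) (i j : Nat) (hp1 : 1 < p) (hpM : ¬ p ∣ M)
    (h1 : d₁ ∣ M) (h2 : d₂ ∣ M) (heq : d₁ * p ^ i = d₂ * p ^ j) : d₁ = d₂ ∧ i = j := by
  rcases (by omega : i ≤ j ∨ j < i) with h | h
  · exact pvUniqueAux p M d₁ d₂ i j hp1 hpM h1 h heq
  · obtain ⟨a, b⟩ := pvUniqueAux p M d₂ d₁ j i hp1 hpM h2 (le_of_lt h) heq.symm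
    exact ⟨a.symm, b.symm⟩

-- ---- pvDivOut characterization ----

theorem pvDivOut_succ (f : Nat) (d temp e : Int) :
    pvDivOut (f + 1) d temp e =
      (if PySem.Int.mod temp d = 0 then pvDivOut f d (PySem.Int.floordiv temp d) (e + 1)
       else (e, temp)) := rfl

theorem pvDivOut_spec : ∀ (fuel : Nat) (d temp e : Int), 1 < d → 0 < temp → temp.toNat ≤ fuel →
    ∃ m : Nat, (pvDivOut fuel d temp e).1 = e + m ∧
      temp = d ^ m * (pvDivOut fuel d temp e).2 ∧
      0 < (pvDivOut fuel d temp e).2 ∧ ¬ d ∣ (pvDivOut fuel d temp e).2 ∧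
      (d ∣ temp → 1 ≤ m) := by
  intro fuel
  induction fuel with
  | zero =>
    intro d temp e hd ht hf
    omega
  | succ f ih =>
    intro d temp e hd ht hf
    rw [pvDivOut_succ]
    by_cases hc : PySem.Int.mod temp d = 0
    · rw [if_pos hc]
      have hdvd : d ∣ temp := (PySem.Int.mod_eq_zero_iff_dvd temp d).mp hc
      have hfd : PySem.Int.floordiv temp d = temp / d := PySem.Int.floordiv_eq_ediv_of_pos (by omega)
      obtain ⟨q, hq⟩ := hdvd
      have hq' : temp / d = q := by
        rw [hq]
        exact Int.mul_ediv_cancel_left q (by omega)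
      have hqpos : 0 < q := by nlinarith
      have hqlt : q < temp := by nlinarith
      have htd : 0 < PySem.Int.floordiv temp d := by rw [hfd, hq']; exact hqpos
      have hfuel : (PySem.Int.floordiv temp d).toNat ≤ f := by rw [hfd, hq']; omega
      obtain ⟨m, h1, h2, h3, h4, _⟩ := ih d (PySem.Int.floordiv temp d) (e + 1) hd htd hfuel
      refine ⟨m + 1, ?_, ?_, h3, h4, fun _ => by omega⟩
      · rw [h1]; push_cast; ring
      · calc temp = d * PySem.Int.floordiv temp d := by rw [hfd, hq', hq]
          _ = d * (d ^ m * (pvDivOut f d (PySem.Int.floordiv temp d) (e + 1)).2) := by rw [← h2]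
          _ = d ^ (m + 1) * (pvDivOut f d (PySem.Int.floordiv temp d) (e + 1)).2 := by
              rw [pow_succ]; ring
    · rw [if_neg hc]
      have hnd : ¬ d ∣ temp := fun hdvd => hc ((PySem.Int.mod_eq_zero_iff_dvd temp d).mpr hdvd)
      exact ⟨0, by simp, by simp, ht, hnd, fun hdvd => absurd hdvd hnd⟩

-- ---- pvFactorLoop characterization ----

def pvProdPE (F : List (Int × Int)) : Int := F.foldr (fun pe acc => pe.1 ^ pe.2.toNat * acc) 1

def pvProdSq (F : List (Int × Int)) : Int := F.foldr (fun pe acc => pe.1 ^ (2 * pe.2.toNat) * acc) 1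

theorem pvProdPE_cons (pe : Int × Int) (F : List (Int × Int)) :
    pvProdPE (pe :: F) = pe.1 ^ pe.2.toNat * pvProdPE F := rfl

theorem pvProdSq_cons (pe : Int × Int) (F : List (Int × Int)) :
    pvProdSq (pe :: F) = pe.1 ^ (2 * pe.2.toNat) * pvProdSq F := rfl

theorem pvPrimeOfNoSmallDvd (d : Int) (hd : 1 < d)
    (hnd : ∀ j : Int, 1 < j → j < d → ¬ j ∣ d) : Prime d := by
  rw [Int.prime_iff_natAbs_prime]
  rw [Nat.prime_def_lt]
  constructor
  · omega
  · intro m hm hmd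
    by_contra hne
    have hm0 : m ≠ 0 := by
      rintro rfl
      have := Nat.eq_zero_of_zero_dvd hmd
      omega
    have hm2 : 2 ≤ m := by omega
    have hdvd : (m : Int) ∣ d := by
      have h1 : (m : Int) ∣ (d.natAbs : Int) := Int.natCast_dvd_natCast.mpr hmd
      rwa [Int.natAbs_of_nonneg (by omega)] at h1
    exact hnd (m : Int) (by exact_mod_cast hm2) (by omega) hdvd

theorem pvFactorLoop_zero (d temp : Int) (facc : List (Int × Int)) :
    pvFactorLoop 0 d temp facc = (facc, temp) := rfl

theorem pvFactorLoop_succ (f : Nat) (d temp : Int) (facc : List (Int × Int)) :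
    pvFactorLoop (f + 1) d temp facc =
      (if d * d ≤ temp then
        if PySem.Int.mod temp d = 0 then
          pvFactorLoop f (d + 1) (pvDivOut (temp.toNat + 1) d temp 0).2
            (facc ++ [(d, (pvDivOut (temp.toNat + 1) d temp 0).1)])
        else pvFactorLoop f (d + 1) temp facc
      else (facc, temp)) := rfl

theorem pvFactorLoop_spec : ∀ (fuel : Nat) (d temp : Int) (facc : List (Int × Int)),
    1 < d → 0 < temp → (∀ j : Int, 1 < j → j < d → ¬ j ∣ temp) →
    (temp + 1 - d).toNat ≤ fuel →
    ∃ (newF : List (Int × Int)) (dfin : Int),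
      (pvFactorLoop fuel d temp facc).1 = facc ++ newF ∧
      temp = pvProdPE newF * (pvFactorLoop fuel d temp facc).2 ∧
      0 < (pvFactorLoop fuel d temp facc).2 ∧
      d ≤ dfin ∧
      (∀ pe ∈ newF, d ≤ pe.1 ∧ pe.1 < dfin ∧ 1 ≤ pe.2 ∧ Prime pe.1 ∧ 1 < pe.1) ∧
      newF.Pairwise (fun a b => a.1 < b.1) ∧
      (pvFactorLoop fuel d temp facc).2 < dfin * dfin ∧
      (∀ j : Int, 1 < j → j < dfin → ¬ j ∣ (pvFactorLoop fuel d temp facc).2) := by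
  intro fuel
  induction fuel with
  | zero =>
    intro d temp facc hd ht hnd hf
    rw [pvFactorLoop_zero]
    have hd2 : d * 1 ≤ d * d := mul_le_mul_of_nonneg_left (by omega) (by omega)
    refine ⟨[], d, (List.append_nil facc).symm, ?_, ht, le_refl d, by simp,
      List.Pairwise.nil, by omega, hnd⟩
    show temp = 1 * temp
    rw [one_mul]
  | succ f ih =>
    intro d temp facc hd ht hnd hf
    rw [pvFactorLoop_succ]
    by_cases hguard : d * d ≤ temp
    · rw [if_pos hguard]
      have hd2 : d * 1 ≤ d * d := mul_le_mul_of_nonneg_left (by omega) (by omega)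
      by_cases hc : PySem.Int.mod temp d = 0
      · rw [if_pos hc]
        have hdvd : d ∣ temp := (PySem.Int.mod_eq_zero_iff_dvd temp d).mp hc
        obtain ⟨m, hm1, hm2, hm3, hm4, hm5⟩ :=
          pvDivOut_spec (temp.toNat + 1) d temp 0 hd ht (by omega)
        have hm : 1 ≤ m := hm5 hdvd
        have hpm : (1:Int) ≤ d ^ m := by
          have := pow_pos (show (0:Int) < d by omega) m
          omega
        have hrle : (pvDivOut (temp.toNat + 1) d temp 0).2 ≤ temp := by
          calc (pvDivOut (temp.toNat + 1) d temp 0).2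
              = 1 * (pvDivOut (temp.toNat + 1) d temp 0).2 := (one_mul _).symm
            _ ≤ d ^ m * (pvDivOut (temp.toNat + 1) d temp 0).2 :=
                mul_le_mul_of_nonneg_right hpm (le_of_lt hm3)
            _ = temp := hm2.symm
        have hr2 : (pvDivOut (temp.toNat + 1) d temp 0).2 ∣ temp := Dvd.intro_left _ hm2.symm
        have hnd' : ∀ j : Int, 1 < j → j < d + 1 → ¬ j ∣ (pvDivOut (temp.toNat + 1) d temp 0).2 := by
          intro j h1 h2 hj
          rcases (by omega : j < d ∨ j = d) with h3 | h3
          · exact hnd j h1 h3 (hj.trans hr2)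
          · subst h3; exact hm4 hj
        obtain ⟨newF, dfin, ih1, ih2, ih3, ih4, ih5, ih6, ih7, ih8⟩ :=
          ih (d + 1) (pvDivOut (temp.toNat + 1) d temp 0).2
            (facc ++ [(d, (pvDivOut (temp.toNat + 1) d temp 0).1)]) (by omega) hm3 hnd'
            (by omega)
        have hprime : Prime d := by
          apply pvPrimeOfNoSmallDvd d hd
          intro j h1 h2 hj
          exact hnd j h1 h2 (hj.trans hdvd)
        refine ⟨(d, (pvDivOut (temp.toNat + 1) d temp 0).1) :: newF, dfin, ?_, ?_, ih3,
          by omega, ?_, ?_, ih7, ih8⟩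
        · rw [ih1, List.append_assoc]; rfl
        · have he : ((pvDivOut (temp.toNat + 1) d temp 0).1).toNat = m := by omega
          rw [pvProdPE_cons]
          show temp = d ^ ((pvDivOut (temp.toNat + 1) d temp 0).1).toNat * pvProdPE newF * _
          rw [he]
          calc temp = d ^ m * (pvDivOut (temp.toNat + 1) d temp 0).2 := hm2
            _ = d ^ m * (pvProdPE newF *
                (pvFactorLoop f (d + 1) (pvDivOut (temp.toNat + 1) d temp 0).2
                  (facc ++ [(d, (pvDivOut (temp.toNat + 1) d temp 0).1)])).2) := by rw [← ih2]
            _ = d ^ m * pvProdPE newF *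
                (pvFactorLoop f (d + 1) (pvDivOut (temp.toNat + 1) d temp 0).2
                  (facc ++ [(d, (pvDivOut (temp.toNat + 1) d temp 0).1)])).2 := by ring
        · intro pe hpe
          rcases List.mem_cons.mp hpe with rfl | hpe
          · refine ⟨le_refl d, by omega, ?_, hprime, hd⟩
            show (1:Int) ≤ (pvDivOut (temp.toNat + 1) d temp 0).1
            omega
          · obtain ⟨a1, a2, a3, a4, a5⟩ := ih5 pe hpe
            exact ⟨by omega, a2, a3, a4, a5⟩
        · refine List.Pairwise.cons ?_ ih6
          intro pe hpe
          obtain ⟨a1, _, _, _, _⟩ := ih5 pe hpe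
          show d < pe.1
          omega
      · rw [if_neg hc]
        have hndd : ¬ d ∣ temp := fun hj => hc ((PySem.Int.mod_eq_zero_iff_dvd temp d).mpr hj)
        have hnd' : ∀ j : Int, 1 < j → j < d + 1 → ¬ j ∣ temp := by
          intro j h1 h2 hj
          rcases (by omega : j < d ∨ j = d) with h3 | h3
          · exact hnd j h1 h3 hj
          · subst h3; exact hndd hj
        obtain ⟨newF, dfin, ih1, ih2, ih3, ih4, ih5, ih6, ih7, ih8⟩ :=
          ih (d + 1) temp facc (by omega) ht hnd' (by omega)
        refine ⟨newF, dfin, ih1, ih2, ih3, by omega, ?_, ih6, ih7, ih8⟩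
        intro pe hpe
        obtain ⟨a1, a2, a3, a4, a5⟩ := ih5 pe hpe
        exact ⟨by omega, a2, a3, a4, a5⟩
    · rw [if_neg hguard]
      refine ⟨[], d, (List.append_nil facc).symm, ?_, ht, le_refl d, by simp,
        List.Pairwise.nil, by omega, hnd⟩
      show temp = 1 * temp
      rw [one_mul]


-- ---- pvFactor characterization ----

theorem pvProdPE_append (A B : List (Int × Int)) :
    pvProdPE (A ++ B) = pvProdPE A * pvProdPE B := by
  induction A with
  | nil => simp [pvProdPE]
  | cons pe t ih => rw [List.cons_append, pvProdPE_cons, pvProdPE_cons, ih, mul_assoc]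

theorem pvFactor_spec (n : Int) (hn : 0 < n) :
    n = pvProdPE (pvFactor n) ∧
    (∀ pe ∈ pvFactor n, 1 ≤ pe.2 ∧ Prime pe.1 ∧ 1 < pe.1) ∧
    (pvFactor n).Pairwise (fun a b => a.1 < b.1) := by
  have hnd0 : ∀ j : Int, 1 < j → j < 2 → ¬ j ∣ n := by
    intro j h1 h2
    omega
  obtain ⟨newF, dfin, h1, h2, h3, h4, h5, h6, h7, h8⟩ :=
    pvFactorLoop_spec (n.toNat + 2) 2 n [] (by omega) hn hnd0 (by omega)
  simp only [List.nil_append] at h1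
  have hunf : pvFactor n =
      if 1 < (pvFactorLoop (n.toNat + 2) 2 n []).2 then
        (pvFactorLoop (n.toNat + 2) 2 n []).1 ++ [((pvFactorLoop (n.toNat + 2) 2 n []).2, 1)]
      else (pvFactorLoop (n.toNat + 2) 2 n []).1 := rfl
  by_cases hcase : 1 < (pvFactorLoop (n.toNat + 2) 2 n []).2
  · have hprime2 : Prime (pvFactorLoop (n.toNat + 2) 2 n []).2 := by
      rw [Int.prime_iff_natAbs_prime]
      by_contra hnp
      have hT : ((pvFactorLoop (n.toNat + 2) 2 n []).2.natAbs : Int) = (pvFactorLoop (n.toNat + 2) 2 n []).2 :=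
        Int.natAbs_of_nonneg (by omega)
      have hT2 : 2 ≤ (pvFactorLoop (n.toNat + 2) 2 n []).2.natAbs := by omega
      have hq := Nat.minFac_prime (show (pvFactorLoop (n.toNat + 2) 2 n []).2.natAbs ≠ 1 by omega)
      have hqd := Nat.minFac_dvd (pvFactorLoop (n.toNat + 2) 2 n []).2.natAbs
      have hsq := Nat.minFac_sq_le_self (n := (pvFactorLoop (n.toNat + 2) 2 n []).2.natAbs) (by omega) hnp
      have hq2 : 2 ≤ (pvFactorLoop (n.toNat + 2) 2 n []).2.natAbs.minFac := hq.two_le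
      have hqdvd : ((pvFactorLoop (n.toNat + 2) 2 n []).2.natAbs.minFac : Int) ∣ (pvFactorLoop (n.toNat + 2) 2 n []).2 := by
        have hh : ((pvFactorLoop (n.toNat + 2) 2 n []).2.natAbs.minFac : Int) ∣
            ((pvFactorLoop (n.toNat + 2) 2 n []).2.natAbs : Int) := Int.natCast_dvd_natCast.mpr hqd
        rwa [hT] at hh
      have hsq' : ((pvFactorLoop (n.toNat + 2) 2 n []).2.natAbs.minFac : Int) ^ 2 ≤ (pvFactorLoop (n.toNat + 2) 2 n []).2 := by
        rw [← hT]
        exact_mod_cast hsq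
      have hql : ((pvFactorLoop (n.toNat + 2) 2 n []).2.natAbs.minFac : Int) < dfin := by
        by_contra hge
        push_neg at hge
        nlinarith [h7, hsq']
      exact h8 _ (by exact_mod_cast hq2) hql hqdvd
    have hge : dfin ≤ (pvFactorLoop (n.toNat + 2) 2 n []).2 := by
      by_contra hlt
      push_neg at hlt
      exact h8 _ hcase hlt dvd_rfl
    rw [hunf, if_pos hcase]
    refine ⟨?_, ?_, ?_⟩
    · rw [h1, pvProdPE_append]
      have hsing : pvProdPE [((pvFactorLoop (n.toNat + 2) 2 n []).2, 1)] = (pvFactorLoop (n.toNat + 2) 2 n []).2 := by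
        simp [pvProdPE]
      rw [hsing]
      exact h2
    · intro pe hpe
      rw [h1] at hpe
      rcases List.mem_append.mp hpe with hpe | hpe
      · obtain ⟨_, _, a3, a4, a5⟩ := h5 pe hpe
        exact ⟨a3, a4, a5⟩
      · have : pe = ((pvFactorLoop (n.toNat + 2) 2 n []).2, 1) := by simpa using hpe
        subst this
        exact ⟨le_refl 1, hprime2, hcase⟩
    · rw [h1]
      rw [List.pairwise_append]
      refine ⟨h6, by simp, ?_⟩
      intro a ha b hb
      have hb' : b = ((pvFactorLoop (n.toNat + 2) 2 n []).2, 1) := by simpa using hb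
      subst hb'
      obtain ⟨_, a2, _, _, _⟩ := h5 a ha
      show a.1 < (pvFactorLoop (n.toNat + 2) 2 n []).2
      omega
  · have hone : (pvFactorLoop (n.toNat + 2) 2 n []).2 = 1 := by omega
    rw [hunf, if_neg hcase]
    rw [hone, mul_one] at h2
    rw [h1]
    refine ⟨h2, ?_, h6⟩
    intro pe hpe
    obtain ⟨_, _, a3, a4, a5⟩ := h5 pe hpe
    exact ⟨a3, a4, a5⟩

-- ---- the divisor-expansion loops ----

theorem pvFoldIgnore (d p : Int) : ∀ (l : List Int) (acc : List Int) (w : Int),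
    (l.foldl (fun (st : List Int × Int) _ => (st.1 ++ [d * st.2], st.2 * p)) (acc, w))
    = (acc ++ (List.range l.length).map (fun i => d * (w * p ^ i)), w * p ^ l.length) := by
  intro l
  induction l with
  | nil => intro acc w; simp
  | cons x t ih =>
    intro acc w
    simp only [List.foldl_cons, List.length_cons, ih]
    rw [List.range_succ_eq_map, List.map_cons, List.map_map]
    have h1 : ((fun i => d * (w * p ^ i)) ∘ Nat.succ) = fun i => d * (w * p * p ^ i) := by
      funext i; simp only [Function.comp_apply, pow_succ]; ring
    rw [h1]
    simp only [Prod.mk.injEq]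
    constructor
    · simp
    · rw [pow_succ]; ring

theorem pvStepEq (p e : Int) (divs : List Int) :
    divs.foldl (fun new_divs d =>
      ((PySem.List.pyRange 0 (2 * e + 1) 1).foldl
        (fun (st : List Int × Int) _ => (st.1 ++ [d * st.2], st.2 * p))
        (new_divs, 1)).1) []
    = divs.flatMap (fun d =>
        (List.range (PySem.List.pyRange 0 (2 * e + 1) 1).length).map (fun i => d * p ^ i)) := by
  have hb : (fun (new_divs : List Int) (d : Int) =>
      ((PySem.List.pyRange 0 (2 * e + 1) 1).foldl
        (fun (st : List Int × Int) _ => (st.1 ++ [d * st.2], st.2 * p))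
        (new_divs, 1)).1)
      = fun new_divs d => new_divs ++
        (List.range (PySem.List.pyRange 0 (2 * e + 1) 1).length).map (fun i => d * p ^ i) := by
    funext nd dd
    rw [pvFoldIgnore]
    simp
  rw [hb, PySem.List.foldl_append_eq_flatMap]
  simp

theorem pvExpand_go (F : List (Int × Int)) : ∀ (divs : List Int) (M : Int),
    0 < M →
    divs.Nodup →
    (∀ x, x ∈ divs ↔ 0 < x ∧ x ∣ M) →
    (∀ pe ∈ F, 1 ≤ pe.2 ∧ Prime pe.1 ∧ 1 < pe.1 ∧ ¬ pe.1 ∣ M) →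
    F.Pairwise (fun a b => a.1 ≠ b.1) →
    (F.foldl (fun divs pe =>
      divs.foldl (fun new_divs d =>
        ((PySem.List.pyRange 0 (2 * pe.2 + 1) 1).foldl
          (fun (st : List Int × Int) _ => (st.1 ++ [d * st.2], st.2 * pe.1))
          (new_divs, 1)).1)
        []) divs).Nodup ∧
    (∀ x, x ∈ F.foldl (fun divs pe =>
      divs.foldl (fun new_divs d =>
        ((PySem.List.pyRange 0 (2 * pe.2 + 1) 1).foldl
          (fun (st : List Int × Int) _ => (st.1 ++ [d * st.2], st.2 * pe.1))
          (new_divs, 1)).1)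
        []) divs ↔ 0 < x ∧ x ∣ M * pvProdSq F) := by
  induction F with
  | nil =>
    intro divs M hM hnd hmem hF hpw
    refine ⟨by simpa using hnd, ?_⟩
    intro x
    simp only [List.foldl_nil]
    rw [show pvProdSq [] = 1 from rfl, mul_one]
    exact hmem x
  | cons pe rest ih =>
    intro divs M hM hnd hmem hF hpw
    obtain ⟨he1, hprime, hp1, hpM⟩ := hF pe List.mem_cons_self
    simp only [List.foldl_cons]
    rw [pvStepEq]
    have hKval : (PySem.List.pyRange 0 (2 * pe.2 + 1) 1).length = 2 * pe.2.toNat + 1 := by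
      rw [PySem.List.length_pyRange_one]
      omega
    have hmem' : ∀ x, x ∈ divs.flatMap (fun d =>
        (List.range (PySem.List.pyRange 0 (2 * pe.2 + 1) 1).length).map (fun i => d * pe.1 ^ i)) ↔
        (0 < x ∧ x ∣ M * pe.1 ^ (2 * pe.2.toNat)) := by
      intro x
      rw [List.mem_flatMap]
      constructor
      · rintro ⟨d, hd, hx⟩
        rw [List.mem_map] at hx
        obtain ⟨i, hiK, rfl⟩ := hx
        rw [List.mem_range, hKval] at hiK
        obtain ⟨hdpos, hdM⟩ := (hmem d).mp hd
        refine ⟨mul_pos hdpos (pow_pos (by omega) i), ?_⟩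
        exact mul_dvd_mul hdM (pow_dvd_pow pe.1 (by omega))
      · rintro ⟨hxpos, hxdvd⟩
        obtain ⟨a, b, ha, hb, hab⟩ := exists_dvd_and_dvd_of_dvd_mul hxdvd
        have haA : ((a.natAbs : Int)) ∣ M := Int.natAbs_dvd.mpr ha
        have hbA : ((b.natAbs : Int)) ∣ pe.1 ^ (2 * pe.2.toNat) := Int.natAbs_dvd.mpr hb
        have hb0 : b ≠ 0 := by rintro rfl; rw [mul_zero] at hab; omega
        have ha0 : a ≠ 0 := by rintro rfl; rw [zero_mul] at hab; omega
        obtain ⟨i, hile, hbi⟩ := pvDvdPrimePow pe.1 (b.natAbs : Int) hprime hp1 (by omega) hbA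
        refine ⟨(a.natAbs : Int), (hmem _).mpr ⟨by omega, haA⟩, ?_⟩
        rw [List.mem_map]
        refine ⟨i, by rw [List.mem_range]; omega, ?_⟩
        have hxabs : x = (a.natAbs : Int) * (b.natAbs : Int) := by
          have h1 : x.natAbs = a.natAbs * b.natAbs := by rw [hab, Int.natAbs_mul]
          have h2 : (x.natAbs : Int) = x := Int.natAbs_of_nonneg (by omega)
          rw [← h2, h1]
          push_cast
          rfl
        rw [← hbi, ← hxabs]
    have hnd' : (divs.flatMap (fun d =>
        (List.range (PySem.List.pyRange 0 (2 * pe.2 + 1) 1).length).map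
          (fun i => d * pe.1 ^ i))).Nodup := by
      rw [List.nodup_flatMap]
      constructor
      · intro d hd
        obtain ⟨hdpos, hdM⟩ := (hmem d).mp hd
        refine List.Nodup.map_on ?_ (List.nodup_range)
        intro i _ j _ hij
        exact (pvUnique pe.1 M d d i j hp1 hpM hdM hdM hij).2
      · refine List.Pairwise.imp_of_mem ?_ hnd
        intro d1 d2 h1 h2 hne
        simp only [Function.onFun]
        intro x hx1 hx2
        rw [List.mem_map] at hx1 hx2
        obtain ⟨i, hi, rfl⟩ := hx1
        obtain ⟨j, hj, hij⟩ := hx2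
        obtain ⟨hp1d, hd1M⟩ := (hmem d1).mp h1
        obtain ⟨hp2d, hd2M⟩ := (hmem d2).mp h2
        exact hne (pvUnique pe.1 M d1 d2 i j hp1 hpM hd1M hd2M hij.symm).1
    have hpos' : 0 < M * pe.1 ^ (2 * pe.2.toNat) := mul_pos hM (pow_pos (by omega) _)
    have hrest : ∀ q ∈ rest, 1 ≤ q.2 ∧ Prime q.1 ∧ 1 < q.1 ∧
        ¬ q.1 ∣ M * pe.1 ^ (2 * pe.2.toNat) := by
      intro q hq
      obtain ⟨b1, b2, b3, b4⟩ := hF q (List.mem_cons_of_mem _ hq)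
      refine ⟨b1, b2, b3, ?_⟩
      intro hdvd
      rcases (Prime.dvd_mul b2).mp hdvd with hc | hc
      · exact b4 hc
      · have hqp : q.1 ∣ pe.1 := b2.dvd_of_dvd_pow hc
        have heq := pvPrimeEq pe.1 q.1 hprime b2 hp1 b3 hqp
        have hne : pe.1 ≠ q.1 := (List.pairwise_cons.mp hpw).1 q hq
        exact hne heq.symm
    have hpw' : rest.Pairwise (fun a b => a.1 ≠ b.1) := (List.pairwise_cons.mp hpw).2
    obtain ⟨c1, c2⟩ := ih _ _ hpos' hnd' hmem' hrest hpw'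
    refine ⟨c1, ?_⟩
    intro x
    rw [c2 x, pvProdSq_cons, ← mul_assoc]

theorem pvProdSq_eq (F : List (Int × Int)) : pvProdSq F = pvProdPE F ^ 2 := by
  induction F with
  | nil => simp [pvProdSq, pvProdPE]
  | cons pe t ih =>
    rw [pvProdSq_cons, pvProdPE_cons, ih, mul_pow, ← pow_mul, Nat.mul_comm]

theorem pvExpand_spec (n : Int) (hn : 0 < n) :
    (pvExpand (pvFactor n)).Nodup ∧
    (∀ x, x ∈ pvExpand (pvFactor n) ↔ 0 < x ∧ x ∣ n * n) := by
  obtain ⟨hprod, hmemF, hpwlt⟩ := pvFactor_spec n hn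
  have h1 : ∀ pe ∈ pvFactor n, 1 ≤ pe.2 ∧ Prime pe.1 ∧ 1 < pe.1 ∧ ¬ pe.1 ∣ (1 : Int) := by
    intro pe hpe
    obtain ⟨a1, a2, a3⟩ := hmemF pe hpe
    refine ⟨a1, a2, a3, ?_⟩
    intro hdvd
    have := Int.le_of_dvd one_pos hdvd
    omega
  have h2 : (pvFactor n).Pairwise (fun a b => a.1 ≠ b.1) :=
    hpwlt.imp (fun h => ne_of_lt h)
  have h3 : ∀ x : Int, x ∈ ([1] : List Int) ↔ 0 < x ∧ x ∣ 1 := by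
    intro x
    simp only [List.mem_singleton]
    constructor
    · rintro rfl
      exact ⟨one_pos, dvd_refl 1⟩
    · rintro ⟨hx, hd⟩
      have := Int.le_of_dvd one_pos hd
      omega
  obtain ⟨c1, c2⟩ := pvExpand_go (pvFactor n) [1] 1 one_pos (by simp) h3 h1 h2
  have hsq : pvProdSq (pvFactor n) = n * n := by
    rw [pvProdSq_eq, ← hprod]
    ring
  constructor
  · exact c1
  · intro x
    rw [pvExpand, c2 x, one_mul, hsq]

-- ---- B-side characterization ----

theorem pvFoldAddMem (n : Int) (l : List Int) : ∀ (s0 : PySem.Set Int) (x : Int),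
    x ∈ l.foldl (fun s j => if PySem.Int.mod n j = 0 then
        PySem.Set.add (PySem.Set.add s j) (PySem.Int.floordiv n j) else s) s0 ↔
    x ∈ s0 ∨ ∃ j ∈ l, PySem.Int.mod n j = 0 ∧ (x = j ∨ x = PySem.Int.floordiv n j) := by
  induction l with
  | nil =>
    intro s0 x
    simp
  | cons a t ih =>
    intro s0 x
    simp only [List.foldl_cons]
    by_cases hc : PySem.Int.mod n a = 0
    · rw [if_pos hc, ih]
      simp only [PySem.Set.mem_add, List.mem_cons]
      constructor
      · rintro (((h | h) | h) | h)
        · exact Or.inl h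
        · exact Or.inr ⟨a, Or.inl rfl, hc, Or.inl h⟩
        · exact Or.inr ⟨a, Or.inl rfl, hc, Or.inr h⟩
        · obtain ⟨j, hj, hj2, hj3⟩ := h
          exact Or.inr ⟨j, Or.inr hj, hj2, hj3⟩
      · rintro (h | ⟨j, hj | hj, hj2, hj3⟩)
        · exact Or.inl (Or.inl (Or.inl h))
        · subst hj
          rcases hj3 with rfl | rfl
          · exact Or.inl (Or.inl (Or.inr rfl))
          · exact Or.inl (Or.inr rfl)
        · exact Or.inr ⟨j, hj, hj2, hj3⟩
    · rw [if_neg hc, ih]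
      constructor
      · rintro (h | ⟨j, hj, hj2, hj3⟩)
        · exact Or.inl h
        · exact Or.inr ⟨j, List.mem_cons_of_mem a hj, hj2, hj3⟩
      · rintro (h | ⟨j, hj, hj2, hj3⟩)
        · exact Or.inl h
        · rcases List.mem_cons.mp hj with rfl | hj'
          · exact absurd hj2 hc
          · exact Or.inr ⟨j, hj', hj2, hj3⟩

theorem pvScanMem (n : Int) (hn : 0 < n) (x : Int) :
    x ∈ (PySem.List.pyRange 1 (((Nat.sqrt n.toNat : Nat) : Int) + 1) 1).foldl
        (fun s j => if PySem.Int.mod n j = 0 then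
          PySem.Set.add (PySem.Set.add s j) (PySem.Int.floordiv n j) else s)
        PySem.Set.empty ↔ (0 < x ∧ x ∣ n) := by
  rw [pvFoldAddMem]
  constructor
  · rintro (h | ⟨j, hj, hmod, hx⟩)
    · exact absurd h (by simp [PySem.Set.empty])
    · rw [PySem.List.mem_pyRange_one] at hj
      obtain ⟨hj1, hj2⟩ := hj
      have hjd : j ∣ n := (PySem.Int.mod_eq_zero_iff_dvd n j).mp hmod
      have hfd : PySem.Int.floordiv n j = n / j := PySem.Int.floordiv_eq_ediv_of_pos (by omega)
      obtain ⟨q, hq⟩ := hjd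
      have hq' : n / j = q := by
        rw [hq]
        exact Int.mul_ediv_cancel_left q (by omega)
      have hqpos : 0 < q := by nlinarith
      rcases hx with rfl | rfl
      · exact ⟨by omega, ⟨q, hq⟩⟩
      · rw [hfd, hq']
        exact ⟨hqpos, Dvd.intro_left j hq.symm⟩
  · rintro ⟨hxpos, hxdvd⟩
    right
    obtain ⟨q, hq⟩ := hxdvd
    have hqpos : 0 < q := by nlinarith
    have hsn : n < (((Nat.sqrt n.toNat : Nat) : Int) + 1) * (((Nat.sqrt n.toNat : Nat) : Int) + 1) := by
      have h1 := Nat.lt_succ_sqrt n.toNat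
      have h2 : ((n.toNat : Int)) = n := Int.toNat_of_nonneg (by omega)
      have h3 : ((n.toNat : Int)) < (((Nat.sqrt n.toNat + 1) * (Nat.sqrt n.toNat + 1) : Nat) : Int) := by
        exact_mod_cast h1
      push_cast at h3
      rw [h2] at h3
      exact h3
    by_cases hxs : x ≤ ((Nat.sqrt n.toNat : Nat) : Int)
    · refine ⟨x, ?_, (PySem.Int.mod_eq_zero_iff_dvd n x).mpr ⟨q, hq⟩, Or.inl rfl⟩
      rw [PySem.List.mem_pyRange_one]
      omega
    · refine ⟨q, ?_, (PySem.Int.mod_eq_zero_iff_dvd n q).mpr ⟨x, by rw [hq]; ring⟩, Or.inr ?_⟩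
      · rw [PySem.List.mem_pyRange_one]
        constructor
        · omega
        · by_contra hqs
          have hx1 : ((Nat.sqrt n.toNat : Nat) : Int) + 1 ≤ x := by omega
          have hq1 : ((Nat.sqrt n.toNat : Nat) : Int) + 1 ≤ q := by omega
          nlinarith
      · have hfd : PySem.Int.floordiv n q = n / q := PySem.Int.floordiv_eq_ediv_of_pos (by omega)
        rw [hfd, hq]
        exact (Int.mul_ediv_cancel x (by omega)).symm

theorem pvAltList_spec (n : Int) (hn : 0 < n) :
    ∃ L : List Int, pvDivisorsOfSquareAlt n = PySem.List.sorted L (fun x => x) false ∧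
      L.Nodup ∧ (∀ x, x ∈ L ↔ 0 < x ∧ x ∣ n * n) := by
  refine ⟨PySem.Set.ofList
      (((PySem.List.pyRange 1 (((Nat.sqrt n.toNat : Nat) : Int) + 1) 1).foldl
        (fun s j => if PySem.Int.mod n j = 0 then
          PySem.Set.add (PySem.Set.add s j) (PySem.Int.floordiv n j) else s)
        PySem.Set.empty).flatMap
        (fun a => ((PySem.List.pyRange 1 (((Nat.sqrt n.toNat : Nat) : Int) + 1) 1).foldl
          (fun s j => if PySem.Int.mod n j = 0 then
            PySem.Set.add (PySem.Set.add s j) (PySem.Int.floordiv n j) else s)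
          PySem.Set.empty).map (fun b => a * b))),
      ?_, PySem.Set.nodup_ofList _, ?_⟩
  · rw [pvDivisorsOfSquareAlt, if_neg (by omega)]
  · intro x
    rw [PySem.Set.mem_ofList, List.mem_flatMap]
    constructor
    · rintro ⟨a, ha, hx⟩
      rw [List.mem_map] at hx
      obtain ⟨b, hb, rfl⟩ := hx
      obtain ⟨hap, had⟩ := (pvScanMem n hn a).mp ha
      obtain ⟨hbp, hbd⟩ := (pvScanMem n hn b).mp hb
      exact ⟨mul_pos hap hbp, mul_dvd_mul had hbd⟩
    · rintro ⟨hxp, hxd⟩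
      obtain ⟨a, b, ha, hb, hab⟩ := exists_dvd_and_dvd_of_dvd_mul hxd
      have ha0 : a ≠ 0 := by
        rintro rfl
        rw [zero_mul] at hab
        omega
      have hb0 : b ≠ 0 := by
        rintro rfl
        rw [mul_zero] at hab
        omega
      have haA : ((a.natAbs : Int)) ∣ n := Int.natAbs_dvd.mpr ha
      have hbA : ((b.natAbs : Int)) ∣ n := Int.natAbs_dvd.mpr hb
      have hxabs : x = (a.natAbs : Int) * (b.natAbs : Int) := by
        have h1 : x.natAbs = a.natAbs * b.natAbs := by rw [hab, Int.natAbs_mul]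
        have h2 : (x.natAbs : Int) = x := Int.natAbs_of_nonneg (by omega)
        rw [← h2, h1]
        push_cast
        rfl
      refine ⟨(a.natAbs : Int), (pvScanMem n hn _).mpr ⟨by omega, haA⟩, ?_⟩
      rw [List.mem_map]
      exact ⟨(b.natAbs : Int), (pvScanMem n hn _).mpr ⟨by omega, hbA⟩, hxabs.symm⟩

-- ---- assembling the two programs ----

theorem pvMain (n : Int) : pvDivisorsOfSquare n = pvDivisorsOfSquareAlt n := by
  by_cases hn : n ≤ 0
  · have hloop : pvFactorLoop (n.toNat + 2) 2 n [] = ([], n) := by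
      rw [show n.toNat + 2 = (n.toNat + 1) + 1 from rfl, pvFactorLoop_succ]
      rw [if_neg (by omega : ¬ (2:Int) * 2 ≤ n)]
    have hfac : pvFactor n = [] := by
      rw [pvFactor]
      simp only [hloop]
      rw [if_neg (by omega : ¬ (1:Int) < n)]
    rw [pvDivisorsOfSquare, hfac]
    rw [pvDivisorsOfSquareAlt, if_pos hn]
    rw [show pvExpand [] = [1] from rfl]
    rfl
  · have hn' : 0 < n := by omega
    obtain ⟨hndA, hmemA⟩ := pvExpand_spec n hn'
    obtain ⟨L, hBdef, hndB, hmemB⟩ := pvAltList_spec n hn'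
    have hperm : (pvExpand (pvFactor n)).Perm L :=
      (List.perm_ext_iff_of_nodup hndA hndB).mpr (fun a => by rw [hmemA a, hmemB a])
    rw [pvDivisorsOfSquare, hBdef]
    exact PySem.List.sorted_eq_sorted_of_perm _ _ _ (fun a b h => h) hperm

theorem pvFindMap (l : List Int) (f : Int → Int) (t : Int) :
    ((l.map (fun d => (d, f d))).find? (fun dr => dr.2 == t)).map (fun dr => dr.1)
      = l.find? (fun d => f d == t) := by
  induction l with
  | nil => rfl
  | cons x xs ih =>
    cases h : (f x == t) with
    | true =>
      rw [List.map_cons, List.find?_cons_of_pos (by simpa using h),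
        List.find?_cons_of_pos (p := fun d => f d == t) (l := xs) h]
      rfl
    | false =>
      rw [List.map_cons, List.find?_cons_of_neg (by simpa using h),
        List.find?_cons_of_neg (p := fun d => f d == t) (l := xs) (by simpa using h)]
      exact ih

-- ===== VERDICT (by name: the statement is the Claim_ definition above) =====
theorem check_coverage_spec : Claim_equal_check_coverage := by
  unfold Claim_equal_check_coverage
  intro p k _
  unfold Spec_check_coverage
  simp only [check_coverage, check_coverage_alt]
  rw [pvMain]
  rw [pvFindMap]
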